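-- pv_equiv track=rewrite | github.com/hawkeyed-panda/memoire-de-parfum | frontend/app.py | match_multi
-- ===== SOURCE A (Python) =====
-- def match_single(text: str, options: list):
--     t = text.lower().strip()
--     for v, lbl in options:
--         if t == v.lower() or t == lbl.lower():
--             return v, lbl
--     for v, lbl in options:
--         if t in v.lower() or t in lbl.lower() or v.lower() in t or lbl.lower() in t:
--             return v, lbl
--     return None
--
-- def match_multi(text: str, options: list):
--     parts = [p.strip() for p in text.replace(", ", ",").split(",")]
--     matched = []
--     for part in parts:
--         m = match_single(part, options)
--         if m and m not in matched:
--             matched.append(m)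
--     return matched
-- ===== SOURCE B (Python) =====
-- def match_single(text: str, options: list):
--     t = text.lower().strip()
--     fallback = None
--     for v, lbl in options:
--         vl, ll = v.lower(), lbl.lower()
--         if t == vl or t == ll:
--             return v, lbl
--         if fallback is None and (t in vl or t in ll or vl in t or ll in t):
--             fallback = (v, lbl)
--     return fallback
--
-- def match_multi(text: str, options: list):
--     parts = [p.strip() for p in text.replace(", ", ",").split(",")]
--     matched = []
--     for part in parts:
--         m = match_single(part, options)
--         if m is not None and m not in matched:
--             matched.append(m)
--     return matched
-- ===== Notes on version B (the rewrite author's own statement) =====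
-- stated objective: alternative
-- what changed: match_single scans the options once, returning on the first exact case-insensitive match and remembering the first substring match as a pending fallback, instead of A's two full passes over the options.
import Mathlib
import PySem

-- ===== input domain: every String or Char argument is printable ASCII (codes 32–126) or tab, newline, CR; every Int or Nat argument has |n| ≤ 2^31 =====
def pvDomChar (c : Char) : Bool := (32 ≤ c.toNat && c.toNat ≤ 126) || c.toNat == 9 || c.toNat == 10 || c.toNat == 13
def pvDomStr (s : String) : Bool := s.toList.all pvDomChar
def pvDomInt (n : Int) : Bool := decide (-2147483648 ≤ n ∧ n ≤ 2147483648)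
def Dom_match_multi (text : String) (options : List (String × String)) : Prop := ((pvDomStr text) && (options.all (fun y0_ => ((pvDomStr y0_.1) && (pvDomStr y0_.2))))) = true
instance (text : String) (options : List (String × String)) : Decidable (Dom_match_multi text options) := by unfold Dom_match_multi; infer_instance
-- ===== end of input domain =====

-- B rewrites match_single as a single pass with early exact return and a pending substring fallback (alternative decomposition; A makes two passes).

-- ===== PORT A =====
-- first loop of A's match_single: exact case-insensitive match
def msExactLoop (t : String) : List (String × String) → Option (String × String)
  | [] => none
  | (v, lbl) :: rest =>
    if t == PySem.Str.lower v || t == PySem.Str.lower lbl then some (v, lbl)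
    else msExactLoop t rest

-- second loop of A's match_single: substring match
def msSubLoop (t : String) : List (String × String) → Option (String × String)
  | [] => none
  | (v, lbl) :: rest =>
    if PySem.Str.isIn t (PySem.Str.lower v) || PySem.Str.isIn t (PySem.Str.lower lbl) ||
       PySem.Str.isIn (PySem.Str.lower v) t || PySem.Str.isIn (PySem.Str.lower lbl) t then some (v, lbl)
    else msSubLoop t rest

def matchSingle (text : String) (options : List (String × String)) : Option (String × String) :=
  let t := PySem.Str.strip (PySem.Str.lower text)
  match msExactLoop t options with
  | some m => some m
  | none => msSubLoop t options

def match_multi (text : String) (options : List (String × String)) : List (String × String) :=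
  let parts := ((PySem.Str.split? (PySem.Str.replace text ", " ",") ",").getD []).map PySem.Str.strip
  parts.foldl (fun matched part =>
    match matchSingle part options with
    | some m => if m ∈ matched then matched else matched ++ [m]
    | none => matched) []

-- ===== PORT B =====
-- single pass: early return on exact match, first substring match kept as pending fallback
def msScan (t : String) : List (String × String) → Option (String × String) → Option (String × String)
  | [], fb => fb
  | (v, lbl) :: rest, fb =>
    let vl := PySem.Str.lower v
    let ll := PySem.Str.lower lbl
    if t == vl || t == ll then some (v, lbl)
    else
      msScan t rest
        (match fb with
         | some f => some f
         | none =>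
           if PySem.Str.isIn t vl || PySem.Str.isIn t ll ||
              PySem.Str.isIn vl t || PySem.Str.isIn ll t then some (v, lbl) else none)

def matchSingleAlt (text : String) (options : List (String × String)) : Option (String × String) :=
  msScan (PySem.Str.strip (PySem.Str.lower text)) options none

def match_multi_alt (text : String) (options : List (String × String)) : List (String × String) :=
  let parts := ((PySem.Str.split? (PySem.Str.replace text ", " ",") ",").getD []).map PySem.Str.strip
  parts.foldl (fun matched part =>
    match matchSingleAlt part options with
    | some m => if m ∈ matched then matched else matched ++ [m]
    | none => matched) []

-- ===== PRECONDITION & SPEC =====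
def Spec_match_multi (text : String) (options : List (String × String)) (out : List (String × String)) : Prop := out = match_multi_alt text options
instance (text : String) (options : List (String × String)) (out : List (String × String)) : Decidable (Spec_match_multi text options out) := by unfold Spec_match_multi; infer_instance

-- ===== CLAIM (what is proved, stated in full; the proofs are below) =====
def Claim_equal_match_multi : Prop := ∀ (text : String) (options : List (String × String)), Dom_match_multi text options → Spec_match_multi text options (match_multi text options)

-- ===== LEMMAS AND PROOFS =====
-- the single-pass scan equals A's two loops, for any pending fallback
theorem msScan_eq (t : String) (opts : List (String × String)) (fb : Option (String × String)) :
    msScan t opts fb =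
      match msExactLoop t opts with
      | some m => some m
      | none => match fb with
                | some f => some f
                | none => msSubLoop t opts := by
  induction opts generalizing fb with
  | nil => cases fb <;> rfl
  | cons p rest ih =>
    obtain ⟨v, lbl⟩ := p
    simp only [msScan, msExactLoop, msSubLoop]
    by_cases hx : (t == PySem.Str.lower v || t == PySem.Str.lower lbl) = true
    · rw [if_pos hx, if_pos hx]
    · rw [if_neg hx, if_neg hx, ih]
      cases fb with
      | some f => cases msExactLoop t rest <;> rfl
      | none =>
        by_cases hs : (PySem.Str.isIn t (PySem.Str.lower v) || PySem.Str.isIn t (PySem.Str.lower lbl) ||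
            PySem.Str.isIn (PySem.Str.lower v) t || PySem.Str.isIn (PySem.Str.lower lbl) t) = true
        · rw [if_pos hs, if_pos hs]
        · rw [if_neg hs, if_neg hs]

theorem matchSingleAlt_eq (text : String) (options : List (String × String)) :
    matchSingleAlt text options = matchSingle text options := by
  unfold matchSingleAlt matchSingle
  rw [msScan_eq]

-- ===== VERDICT (by name: the statement is the Claim_ definition above) =====
theorem match_multi_spec : Claim_equal_match_multi := by
  intro text options _
  unfold Spec_match_multi match_multi match_multi_alt
  simp only [matchSingleAlt_eq]
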